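-- pv_equiv track=rewrite | github.com/MrDiagnose/logicalReasoningCalendar | calendar_gui.py | calOddDays
-- ===== SOURCE A (Python) =====
-- def calOddDays(yearStart,yearEnd,day):
--             for i in range(yearStart+1,yearEnd,1):
--                 if (i % 4 == 0):
--                     day += 2
--                 else:
--                     day += 1
--             day%=7
--             return day
-- ===== SOURCE B (Python) =====
-- def calOddDays(yearStart, yearEnd, day):
--     # Closed form: the loop adds 1 per year in (yearStart, yearEnd) plus an
--     # extra 1 per multiple of 4 in that open interval.
--     if yearEnd - yearStart <= 1:
--         return day % 7
--     n = yearEnd - yearStart - 1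
--     leaps = (yearEnd - 1) // 4 - yearStart // 4
--     return (day + n + leaps) % 7
-- ===== Notes on version B (the rewrite author's own statement) =====
-- stated objective: faster
-- what changed: Replaces the per-year loop with a closed-form count (years in the open interval plus multiples of 4 via floor division), mod 7.
import Mathlib
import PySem

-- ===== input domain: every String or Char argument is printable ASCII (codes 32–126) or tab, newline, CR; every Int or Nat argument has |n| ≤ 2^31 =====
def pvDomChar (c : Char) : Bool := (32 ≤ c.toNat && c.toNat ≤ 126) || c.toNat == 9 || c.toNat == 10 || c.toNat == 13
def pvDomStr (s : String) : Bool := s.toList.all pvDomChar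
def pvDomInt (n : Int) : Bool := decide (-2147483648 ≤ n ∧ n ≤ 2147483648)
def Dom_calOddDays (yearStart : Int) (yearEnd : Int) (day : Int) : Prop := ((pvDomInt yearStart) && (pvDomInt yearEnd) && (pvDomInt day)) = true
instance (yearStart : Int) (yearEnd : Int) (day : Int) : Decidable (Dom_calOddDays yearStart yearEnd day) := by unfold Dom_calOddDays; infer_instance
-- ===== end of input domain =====

-- B replaces A's per-year loop with a closed-form count (O(1) vs O(yearEnd-yearStart)); proved equal on all inputs.


-- ===== PORT A =====
def calOddDays (yearStart : Int) (yearEnd : Int) (day : Int) : Int :=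
  PySem.Int.mod
    ((PySem.List.pyRange (yearStart + 1) yearEnd 1).foldl
      (fun d i => if PySem.Int.mod i 4 == 0 then d + 2 else d + 1) day)
    7

-- ===== PORT B =====
def calOddDays_alt (yearStart : Int) (yearEnd : Int) (day : Int) : Int :=
  if yearEnd - yearStart ≤ 1 then PySem.Int.mod day 7
  else
    PySem.Int.mod
      (day + (yearEnd - yearStart - 1)
        + (PySem.Int.floordiv (yearEnd - 1) 4 - PySem.Int.floordiv yearStart 4))
      7

-- ===== PRECONDITION & SPEC =====
def Spec_calOddDays (yearStart : Int) (yearEnd : Int) (day : Int) (out : Int) : Prop := out = calOddDays_alt yearStart yearEnd day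
instance (yearStart : Int) (yearEnd : Int) (day : Int) (out : Int) : Decidable (Spec_calOddDays yearStart yearEnd day out) := by unfold Spec_calOddDays; infer_instance

-- ===== CLAIM (what is proved, stated in full; the proofs are below) =====
def Claim_equal_calOddDays : Prop := ∀ (yearStart : Int) (yearEnd : Int) (day : Int), Dom_calOddDays yearStart yearEnd day → Spec_calOddDays yearStart yearEnd day (calOddDays yearStart yearEnd day)

-- ===== LEMMAS AND PROOFS =====

-- One loop step: the +2/+1 branch is +1 plus the jump of ⌊·/4⌋ across a.
theorem calOddDays_step (day a : Int) :
    (if PySem.Int.mod a 4 == 0 then day + 2 else day + 1)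
      = day + 1 + (PySem.Int.floordiv a 4 - PySem.Int.floordiv (a - 1) 4) := by
  rw [PySem.Int.mod_eq_emod_of_pos (a := a) (by norm_num),
      PySem.Int.floordiv_eq_ediv_of_pos (a := a) (by norm_num),
      PySem.Int.floordiv_eq_ediv_of_pos (a := a - 1) (by norm_num)]
  by_cases h : a % 4 = 0 <;> simp [h] <;> omega

-- Loop invariant: folding over range(a, a+n) is a closed form.
theorem calOddDays_loop (n : Nat) : ∀ (a day : Int),
    ((PySem.List.pyRange a (a + n) 1).foldl
      (fun d i => if PySem.Int.mod i 4 == 0 then d + 2 else d + 1) day)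
      = day + n + (PySem.Int.floordiv (a + n - 1) 4 - PySem.Int.floordiv (a - 1) 4) := by
  induction n with
  | zero => intro a day; simp
  | succ m ih =>
    intro a day
    rw [PySem.List.pyRange_one_cons (by push_cast; omega : a < a + ((m + 1 : Nat) : Int))]
    have : a + ((m + 1 : Nat) : Int) = (a + 1) + (m : Int) := by push_cast; omega
    rw [this]
    simp only [List.foldl_cons]
    rw [ih (a + 1), calOddDays_step]
    push_cast
    ring_nf

theorem calOddDays_spec_aux (yearStart yearEnd day : Int) :
    calOddDays yearStart yearEnd day = calOddDays_alt yearStart yearEnd day := by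
  unfold calOddDays calOddDays_alt
  by_cases h : yearEnd - yearStart ≤ 1
  · rw [PySem.List.pyRange_one_eq_nil (by omega : yearEnd ≤ yearStart + 1)]
    simp [h]
  · have hn : yearEnd = (yearStart + 1) + ((yearEnd - yearStart - 1).toNat : Int) := by omega
    rw [if_neg h, hn, calOddDays_loop]
    have h1 : ((yearEnd - yearStart - 1).toNat : Int) = yearEnd - yearStart - 1 := by omega
    rw [h1]
    ring_nf

-- ===== VERDICT (by name: the statement is the Claim_ definition above) =====
theorem calOddDays_spec : Claim_equal_calOddDays := by
  intro yearStart yearEnd day _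
  exact calOddDays_spec_aux yearStart yearEnd day
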